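-- pv_equiv track=rewrite | github.com/benyob/tbi-technical-assessment | app/core/retrieval.py | select_relevant_chunks
-- ===== SOURCE A (Python) =====
-- from typing import List
--
-- def select_relevant_chunks(
--     chunks: List[str],
--     query: str,
--     top_k: int = 5,
-- ) -> List[str]:
--     query_terms = set(query.lower().split())
--
--     scored = []
--     for chunk in chunks:
--         score = sum(
--             1 for word in chunk.lower().split()
--             if word in query_terms
--         )
--         scored.append((score, chunk))
--
--     scored.sort(key=lambda x: x[0], reverse=True)
--     return [chunk for _, chunk in scored[:top_k]]
-- ===== SOURCE B (Python) =====
-- def select_relevant_chunks(chunks, query, top_k=5):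
--     query_terms = set(query.lower().split())
--     buckets = {}
--     max_score = 0
--     for chunk in chunks:
--         score = 0
--         for word in chunk.lower().split():
--             if word in query_terms:
--                 score += 1
--         buckets.setdefault(score, []).append(chunk)
--         if max_score < score:
--             max_score = score
--     out = []
--     for s in range(max_score, -1, -1):
--         out += buckets.get(s, [])
--     return out[:top_k]
-- ===== Notes on version B (the rewrite author's own statement) =====
-- stated objective: faster
-- what changed: Replaces the stable descending sort of (score, chunk) pairs by a single-pass bucket grouping (dict score -> chunks in input order, tracking the max score), emitting buckets from max score down to 0 and slicing top_k.
import Mathlib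
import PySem

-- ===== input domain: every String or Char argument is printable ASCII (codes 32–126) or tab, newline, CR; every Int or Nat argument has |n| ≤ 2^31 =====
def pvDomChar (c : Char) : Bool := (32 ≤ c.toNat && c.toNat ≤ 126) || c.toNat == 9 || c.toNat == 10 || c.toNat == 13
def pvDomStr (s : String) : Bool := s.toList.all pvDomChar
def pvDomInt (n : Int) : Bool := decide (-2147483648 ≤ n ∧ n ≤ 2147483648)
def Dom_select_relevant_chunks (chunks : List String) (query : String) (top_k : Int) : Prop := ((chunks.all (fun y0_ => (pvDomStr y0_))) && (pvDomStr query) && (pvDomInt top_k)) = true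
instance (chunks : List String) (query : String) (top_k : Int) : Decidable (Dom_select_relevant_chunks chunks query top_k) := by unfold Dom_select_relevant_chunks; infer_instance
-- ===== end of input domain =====

-- B replaces the stable descending sort of (score, chunk) pairs by one-pass bucket grouping
-- (score -> chunks in input order, tracking the max score) emitted from max score down to 0.

-- ===== PORT A =====
def select_relevant_chunks (chunks : List String) (query : String) (top_k : Int) : List String :=
  let query_terms : PySem.Set String := PySem.Set.ofList (PySem.Str.split₀ (PySem.Str.lower query))
  let scored : List (Int × String) :=
    chunks.foldl (fun acc chunk =>
      acc ++ [((PySem.Str.split₀ (PySem.Str.lower chunk)).foldl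
                 (fun s word => if PySem.Set.contains query_terms word then s + 1 else s) (0 : Int),
               chunk)]) []
  let scoredSorted := PySem.List.sorted scored (fun x => x.1) true
  (PySem.List.slice scoredSorted none (some top_k)).map (fun x => x.2)

-- ===== PORT B =====
def select_relevant_chunks_alt (chunks : List String) (query : String) (top_k : Int) : List String :=
  let query_terms : PySem.Set String := PySem.Set.ofList (PySem.Str.split₀ (PySem.Str.lower query))
  let st := chunks.foldl (fun (st : PySem.Dict Int (List String) × Int) chunk =>
      let score := (PySem.Str.split₀ (PySem.Str.lower chunk)).foldl
        (fun s word => if PySem.Set.contains query_terms word then s + 1 else s) (0 : Int)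
      (st.1.modify score [] (fun v => v ++ [chunk]), if st.2 < score then score else st.2))
    (PySem.Dict.empty, 0)
  let out := (PySem.List.pyRange st.2 (-1) (-1)).foldl (fun acc s => acc ++ st.1.getD s []) []
  PySem.List.slice out none (some top_k)

-- ===== PRECONDITION & SPEC =====
def Spec_select_relevant_chunks (chunks : List String) (query : String) (top_k : Int) (out : List String) : Prop := out = select_relevant_chunks_alt chunks query top_k
instance (chunks : List String) (query : String) (top_k : Int) (out : List String) : Decidable (Spec_select_relevant_chunks chunks query top_k out) := by unfold Spec_select_relevant_chunks; infer_instance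

-- ===== CLAIM (what is proved, stated in full; the proofs are below) =====
def Claim_equal_select_relevant_chunks : Prop := ∀ (chunks : List String) (query : String) (top_k : Int), Dom_select_relevant_chunks chunks query top_k → Spec_select_relevant_chunks chunks query top_k (select_relevant_chunks chunks query top_k)

-- ===== LEMMAS AND PROOFS =====

-- [M, M-1, ..., 0] as a recursive list
def descList : Nat → List Int
  | 0 => [0]
  | n+1 => ((n+1 : Nat) : Int) :: descList n

theorem mem_descList (n : Nat) (s : Int) : s ∈ descList n ↔ 0 ≤ s ∧ s ≤ (n : Int) := by
  induction n with
  | zero => simp [descList]; omega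
  | succ m ih => simp [descList, ih]; omega

theorem pyRange_desc (n : Nat) : PySem.List.pyRange (n : Int) (-1) (-1) = descList n := by
  induction n with
  | zero =>
    rw [PySem.List.pyRange_neg_one_cons (by omega)]
    rw [PySem.List.pyRange_neg_one_eq_nil (by omega)]
    rfl
  | succ m ih =>
    rw [PySem.List.pyRange_neg_one_cons (by push_cast; omega)]
    have : ((m + 1 : Nat) : Int) - 1 = (m : Int) := by push_cast; omega
    rw [this, ih]
    rfl

theorem insertBy_cons {α : Type} (before : α → α → Bool) (x y : α) (ys : List α) :
    PySem.List.insertBy before x (y :: ys) =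
      if before x y then x :: y :: ys else y :: PySem.List.insertBy before x ys := by
  simp [PySem.List.insertBy]

theorem insertBy_skip (x : Int × String) (p q : List (Int × String))
    (h : ∀ y ∈ p, ¬ y.1 < x.1) :
    PySem.List.insertBy (fun a b => decide (b.1 < a.1)) x (p ++ q) =
      p ++ PySem.List.insertBy (fun a b => decide (b.1 < a.1)) x q := by
  induction p with
  | nil => simp
  | cons y ys ih =>
    rw [List.cons_append, insertBy_cons]
    have hy : ¬ y.1 < x.1 := h y (by simp)
    simp [hy, ih (fun z hz => h z (by simp [hz]))]

theorem insertBy_all (x : Int × String) (q : List (Int × String))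
    (h : ∀ y ∈ q, y.1 < x.1) :
    PySem.List.insertBy (fun a b => decide (b.1 < a.1)) x q = x :: q := by
  cases q with
  | nil => rfl
  | cons y ys =>
    rw [insertBy_cons]
    simp [h y (by simp)]

theorem insert_flatMap (g : Int → List (Int × String))
    (hg : ∀ s y, y ∈ g s → y.1 = s) (x : Int × String) (M : Nat)
    (h0 : 0 ≤ x.1) (hM : x.1 ≤ (M : Int)) :
    PySem.List.insertBy (fun a b => decide (b.1 < a.1)) x ((descList M).flatMap g) =
      (descList M).flatMap (fun s => g s ++ if x.1 == s then [x] else []) := by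
  induction M with
  | zero =>
    have hx : x.1 = 0 := by omega
    simp only [descList, List.flatMap_cons, List.flatMap_nil]
    rw [insertBy_skip x (g 0) [] (fun y hy => by rw [hg 0 y hy]; omega)]
    simp [hx, PySem.List.insertBy]
  | succ m ih =>
    simp only [descList, List.flatMap_cons]
    rcases eq_or_lt_of_le hM with heq | hlt
    · rw [insertBy_skip x (g ((m+1 : Nat) : Int)) _
        (fun y hy => by rw [hg _ y hy]; omega)]
      rw [insertBy_all x _ (fun y hy => by
        rcases List.mem_flatMap.mp hy with ⟨s, hs, hy'⟩
        rw [hg s y hy']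
        have := (mem_descList m s).mp hs
        omega)]
      have h1 : (x.1 == ((m+1 : Nat) : Int)) = true := by simp [heq]
      have hcongr : List.flatMap (fun s => g s ++ if (x.1 == s) = true then [x] else []) (descList m)
          = List.flatMap g (descList m) := by
        apply List.flatMap_congr
        intro s hs
        have := (mem_descList m s).mp hs
        have hne : (x.1 == s) = false := by simp; omega
        simp [hne]
      rw [hcongr]
      have hx1 : x.1 = (m : Int) + 1 := by push_cast at heq; omega
      simp [hx1]
    · have hx : x.1 ≤ (m : Int) := by push_cast at hlt ⊢; omega
      rw [insertBy_skip x (g ((m+1 : Nat) : Int)) _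
        (fun y hy => by rw [hg _ y hy]; push_cast; omega)]
      rw [ih hx]
      simp only [List.append_assoc]
      have hne : ¬ x.1 = (m : Int) + 1 := by push_cast at hlt; omega
      simp [hne]

theorem sorted_buckets (xs : List (Int × String)) (M : Nat)
    (h : ∀ p ∈ xs, 0 ≤ p.1 ∧ p.1 ≤ (M : Int)) :
    PySem.List.sorted xs (fun p => p.1) true =
      (descList M).flatMap (fun s => xs.filter (fun p => p.1 == s)) := by
  induction xs using List.reverseRecOn with
  | nil => simp [PySem.List.sorted]
  | append_singleton xs x ih =>
    rw [PySem.List.sorted_rev_eq_foldl_insertBy, List.foldl_append, List.foldl_cons,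
      List.foldl_nil, ← PySem.List.sorted_rev_eq_foldl_insertBy]
    rw [ih (fun p hp => h p (by simp [hp]))]
    rw [insert_flatMap (fun s => xs.filter (fun p => p.1 == s))
      (fun s y hy => by simpa using (List.mem_filter.mp hy).2) x M
      (h x (by simp)).1 (h x (by simp)).2]
    apply List.flatMap_congr
    intro s _
    simp [List.filter_append, List.filter_cons]

-- the two remaining glue lemmas
theorem slice_map {α β : Type} (f : α → β) (xs : List α) (b : Int) :
    (PySem.List.slice xs none (some b)).map f = PySem.List.slice (xs.map f) none (some b) := by
  by_cases hb : 0 ≤ b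
  · rw [PySem.List.slice_to xs hb, PySem.List.slice_to (xs.map f) hb, List.map_take]
  · push Not at hb
    have hk : 0 < (-b).toNat := by omega
    have hb' : b = -((-b).toNat : Int) := by omega
    rw [hb', PySem.List.slice_to_neg_natCast xs ((-b).toNat) hk, PySem.List.slice_to_neg_natCast (xs.map f) ((-b).toNat) hk,
      List.map_take, List.length_map]

theorem if_lt_eq_max (a b : Int) : (if a < b then b else a) = max a b := by
  rw [max_def]; split_ifs <;> omega

-- core equality, parameterised by the score function
theorem mainEq (sc : String → Int) (hsc : ∀ c, 0 ≤ sc c) (chunks : List String) (top_k : Int) :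
    (PySem.List.slice
        (PySem.List.sorted (chunks.foldl (fun acc chunk => acc ++ [(sc chunk, chunk)]) [])
          (fun x => x.1) true) none (some top_k)).map (fun x => x.2) =
      PySem.List.slice
        ((PySem.List.pyRange
            (chunks.foldl
              (fun (st : PySem.Dict Int (List String) × Int) chunk =>
                (st.1.modify (sc chunk) [] (fun v => v ++ [chunk]),
                 if st.2 < sc chunk then sc chunk else st.2))
              (PySem.Dict.empty, 0)).2 (-1) (-1)).foldl
          (fun acc s => acc ++ (chunks.foldl
              (fun (st : PySem.Dict Int (List String) × Int) chunk =>
                (st.1.modify (sc chunk) [] (fun v => v ++ [chunk]),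
                 if st.2 < sc chunk then sc chunk else st.2))
              (PySem.Dict.empty, 0)).1.getD s []) []) none (some top_k) := by
  have hsplit := PySem.List.foldl_prod_mk
    (f := fun (d : PySem.Dict Int (List String)) c => d.modify (sc c) [] (fun v => v ++ [c]))
    (g := fun (m : Int) c => if m < sc c then sc c else m) chunks PySem.Dict.empty 0
  simp only at hsplit
  rw [hsplit]
  simp only [PySem.List.foldl_append_singleton_eq_map, List.nil_append]
  have hmax := PySem.List.le_foldl_max_int chunks sc 0
  have hcong : chunks.foldl (fun m c => if m < sc c then sc c else m) 0
      = chunks.foldl (fun m c => max m (sc c)) 0 :=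
    PySem.List.foldl_congr_mem chunks _ _ 0 (fun acc x _ => if_lt_eq_max acc (sc x))
  rw [hcong]
  set mx := chunks.foldl (fun m c => max m (sc c)) 0 with hmx
  have h0 : 0 ≤ mx := hmax.1
  have hM : mx = ((mx.toNat : Nat) : Int) := by omega
  rw [hM, pyRange_desc]
  simp only [PySem.List.foldl_append_eq_flatMap, List.nil_append]
  rw [sorted_buckets (chunks.map (fun c => (sc c, c))) mx.toNat (by
    intro p hp
    rcases List.mem_map.mp hp with ⟨c, hc, rfl⟩
    refine ⟨hsc c, ?_⟩
    have := hmax.2 c hc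
    omega)]
  rw [slice_map]
  congr 1
  rw [List.map_flatMap]
  apply List.flatMap_congr
  intro s _
  have hfm := List.foldl_map (f := fun c => (sc c, c))
    (g := fun (d : PySem.Dict Int (List String)) p => d.modify p.1 [] (fun v => v ++ [p.2]))
    (l := chunks) (init := PySem.Dict.empty)
  simp only at hfm
  rw [← hfm, PySem.Dict.getD_foldl_modify_append]
  simp

-- ===== VERDICT (by name: the statement is the Claim_ definition above) =====
theorem select_relevant_chunks_spec : Claim_equal_select_relevant_chunks := by
  intro chunks query top_k _
  unfold Spec_select_relevant_chunks
  exact mainEq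
    (fun c => (PySem.Str.split₀ (PySem.Str.lower c)).foldl
      (fun s word => if PySem.Set.contains
          (PySem.Set.ofList (PySem.Str.split₀ (PySem.Str.lower query))) word then s + 1 else s) 0)
    (fun c => by
      simp only [PySem.List.foldl_if_add_one]
      omega)
    chunks top_k
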